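-- pv_equiv track=rewrite | github.com/JoshuaDunnink/Advent_of_Code | source/2023/day_7.py | replace_jokers
-- ===== SOURCE A (Python) =====
-- POINTS = {
--     "A": 13,
--     "K": 12,
--     "Q": 11,
--     "T": 10,
--     "9": 9,
--     "8": 8,
--     "7": 7,
--     "6": 6,
--     "5": 5,
--     "4": 4,
--     "3": 3,
--     "2": 2,
--     "J": 1,
-- }
--
-- def reverse_hand_rank(cards) -> dict:
--     reverse = {}
--     for key, value in cards.items():
--         if reverse.get(value, {}):
--             reverse[value].append(key)
--         else:
--             reverse.update({value: [key]})
--     return reverse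
--
-- def replace_jokers(cards):
--     jokers = cards["J"]
--     cards["J"] -= jokers
--     reversed_cards = reverse_hand_rank(cards)
--     max_occurances = max(reversed_cards.keys())
--     count_max = len(reversed_cards[max_occurances])
--     if count_max == 1:
--         card = reversed_cards.get(max_occurances)[0]
--         cards[card] += jokers
--     elif count_max > 1:
--         multiple = {
--             POINTS.get(item): item
--             for item in reversed_cards.get(max_occurances)
--         }
--         cards[multiple[max(multiple.keys())]] += jokers
--     return {key: val for key, val in cards.items() if val}
-- ===== SOURCE B (Python) =====
-- POINTS = {
--     "A": 13,
--     "K": 12,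
--     "Q": 11,
--     "T": 10,
--     "9": 9,
--     "8": 8,
--     "7": 7,
--     "6": 6,
--     "5": 5,
--     "4": 4,
--     "3": 3,
--     "2": 2,
--     "J": 1,
-- }
--
--
-- def replace_jokers(cards):
--     jokers = cards["J"]
--     cards["J"] = 0
--     best = max(cards, key=lambda k: (cards[k], POINTS.get(k, 0)))
--     cards[best] += jokers
--     return {k: v for k, v in cards.items() if v}
-- ===== Notes on version B (the rewrite author's own statement) =====
-- stated objective: simpler
-- what changed: B drops A's reverse_hand_rank inverted index (count -> list of cards) and its two-stage tie-break through a points-keyed dict, selecting the card to take the jokers with one max over the dict's keys under the (count, POINTS.get(k, 0)) key.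
-- outside the precondition, e.g. on replace_jokers({'J': 1, 'X': 2, 'Y': 2}): A returns {'X': 2, 'Y': 3}, B returns {'X': 3, 'Y': 2}
import Mathlib
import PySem

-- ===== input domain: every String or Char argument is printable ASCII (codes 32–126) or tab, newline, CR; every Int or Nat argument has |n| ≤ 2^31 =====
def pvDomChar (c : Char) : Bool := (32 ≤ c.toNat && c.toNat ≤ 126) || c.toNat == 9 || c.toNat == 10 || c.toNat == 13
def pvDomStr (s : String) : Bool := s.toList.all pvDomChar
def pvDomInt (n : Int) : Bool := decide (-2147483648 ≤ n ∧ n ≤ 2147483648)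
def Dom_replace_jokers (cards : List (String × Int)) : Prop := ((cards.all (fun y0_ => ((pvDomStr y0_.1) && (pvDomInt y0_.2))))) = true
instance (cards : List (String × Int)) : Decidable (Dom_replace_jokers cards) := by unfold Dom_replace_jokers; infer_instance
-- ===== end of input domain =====

-- B replaces A's inverted count→cards index and two-stage tie-break by a single max over the
-- (count, card points) key; equivalence is about the RETURN value (the Python functions also
-- mutate their dict argument, and both mutate it identically).

-- ===== PORT A =====

def POINTS : PySem.Dict String Int :=
  PySem.Dict.mk [("A", 13), ("K", 12), ("Q", 11), ("T", 10), ("9", 9), ("8", 8), ("7", 7),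
                 ("6", 6), ("5", 5), ("4", 4), ("3", 3), ("2", 2), ("J", 1)]

def reverse_hand_rank (cards : PySem.Dict String Int) : PySem.Dict Int (List String) :=
  -- for key, value in cards.items(): if reverse.get(value, {}): reverse[value].append(key) else reverse.update({value: [key]})
  cards.items.foldl
    (fun reverse kv =>
      if (reverse.getD kv.2 []) ≠ [] then reverse.modify kv.2 [] (fun l => l ++ [kv.1])
      else reverse.insert kv.2 [kv.1])
    PySem.Dict.empty

def replace_jokers (cards : List (String × Int)) : List (String × Int) :=
  let cardsD := PySem.Dict.ofList cards
  match cardsD.get? "J" with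
  | none => []                      -- Python raises KeyError here; excluded by Pre_
  | some jokers =>
    let cardsD := cardsD.insert "J" (jokers - jokers)   -- cards["J"] -= jokers
    let reversed_cards := reverse_hand_rank cardsD
    match PySem.List.max? reversed_cards.keys (fun x => x) with
    | none => []                    -- max() over the keys; empty only if cards was empty, when Python already raised
    | some max_occurances =>
      let count_max := (reversed_cards.getD max_occurances []).length
      let cardsD :=
        if count_max = 1 then
          let card := (reversed_cards.getD max_occurances []).getD 0 ""   -- [0] of a length-1 list
          cardsD.modify card 0 (fun v => v + jokers)    -- cards[card] += jokers (card is a present key)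
        else if count_max > 1 then
          -- multiple = {POINTS.get(item): item for item in ...}; POINTS.get(item) is None for a
          -- non-card label and Python's max() then raises TypeError — Pre_ restricts every key to
          -- a card label, where POINTS.getD item 0 is exactly POINTS.get(item)
          let multiple := (reversed_cards.getD max_occurances []).foldl
            (fun m item => m.insert (POINTS.getD item 0) item)
            (PySem.Dict.empty : PySem.Dict Int String)
          match PySem.List.max? multiple.keys (fun x => x) with
          | none => cardsD          -- unreachable: multiple is nonempty in this branch
          | some mx => cardsD.modify (multiple.getD mx "") 0 (fun v => v + jokers)
        else cardsD
      cardsD.items.filter (fun kv => kv.2 ≠ 0)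

-- ===== PORT B =====

def replace_jokers_alt (cards : List (String × Int)) : List (String × Int) :=
  let cardsD := PySem.Dict.ofList cards
  match cardsD.get? "J" with
  | none => []                      -- Python raises KeyError here; excluded by Pre_
  | some jokers =>
    let cardsD := cardsD.insert "J" 0
    -- best = max(cards, key=lambda k: (cards[k], POINTS.get(k, 0)))
    match PySem.List.max2? cardsD.keys (fun k => cardsD.getD k 0) (fun k => POINTS.getD k 0) with
    | none => []                    -- unreachable: cardsD contains "J"
    | some best =>
      ((cardsD.modify best 0 (fun v => v + jokers)).items).filter (fun kv => kv.2 ≠ 0)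

-- ===== PRECONDITION & SPEC =====

-- the 13 card labels (the keys of POINTS)
def pvLabels : List String := ["A", "K", "Q", "T", "9", "8", "7", "6", "5", "4", "3", "2", "J"]

-- Pre_ excludes only the inputs on which A's value is not one to claim: hands without "J" (both
-- Pythons raise KeyError there) and hands in which two distinct keys of maximal count (jokers
-- zeroed) involve a non-card label — there A raises TypeError (max() compares None with an int)
-- when a card and a non-card tie, and when only non-cards tie A returns the accidental last
-- survivor of its None-collapsing tie-break while B's max returns the first, a first-vs-last
-- tie on labels the function knows nothing about, which no caller would specify.
def Pre_replace_jokers (cards : List (String × Int)) : Prop :=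
  "J" ∈ (PySem.Dict.ofList cards).keys ∧
  (∀ k1 ∈ ((PySem.Dict.ofList cards).insert "J" 0).keys,
   ∀ k2 ∈ ((PySem.Dict.ofList cards).insert "J" 0).keys,
    k1 ≠ k2 →
    (k1 ∉ pvLabels ∨ k2 ∉ pvLabels) →
    (∀ y ∈ ((PySem.Dict.ofList cards).insert "J" 0).keys,
      ((PySem.Dict.ofList cards).insert "J" 0).getD y 0
        ≤ ((PySem.Dict.ofList cards).insert "J" 0).getD k1 0) →
    (∀ y ∈ ((PySem.Dict.ofList cards).insert "J" 0).keys,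
      ((PySem.Dict.ofList cards).insert "J" 0).getD y 0
        ≤ ((PySem.Dict.ofList cards).insert "J" 0).getD k2 0) →
    False)
instance (cards : List (String × Int)) : Decidable (Pre_replace_jokers cards) := by
  unfold Pre_replace_jokers; infer_instance

def pvWitness_replace_jokers : (List (String × Int)) := [("J", 2), ("A", 3), ("K", 3), ("4", 1)]

def Spec_replace_jokers (cards : List (String × Int)) (out : List (String × Int)) : Prop := out = replace_jokers_alt cards
instance (cards : List (String × Int)) (out : List (String × Int)) : Decidable (Spec_replace_jokers cards out) := by unfold Spec_replace_jokers; infer_instance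

-- ===== CLAIM (what is proved, stated in full; the proofs are below) =====
def Claim_equal_replace_jokers : Prop := ∀ (cards : List (String × Int)), Dom_replace_jokers cards → Pre_replace_jokers cards → Spec_replace_jokers cards (replace_jokers cards)

-- ===== LEMMAS AND PROOFS =====

theorem pts_inj : ∀ a ∈ pvLabels, ∀ b ∈ pvLabels, POINTS.getD a 0 = POINTS.getD b 0 → a = b := by
  decide

theorem rev_eq_modify (cards : PySem.Dict String Int) :
    reverse_hand_rank cards
      = cards.items.foldl (fun r kv => r.modify kv.2 [] (fun l => l ++ [kv.1])) PySem.Dict.empty := by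
  unfold reverse_hand_rank
  apply PySem.List.foldl_congr_mem
  intro r kv _
  by_cases h : r.getD kv.2 [] = []
  · simp [h, PySem.Dict.modify]
  · simp [h]

theorem rev_getD (cards : PySem.Dict String Int) (m : Int) :
    (reverse_hand_rank cards).getD m []
      = (cards.items.filter (fun kv => kv.2 == m)).map Prod.fst := by
  rw [rev_eq_modify]
  rw [show (cards.items.foldl (fun r kv => r.modify kv.2 [] (fun l => l ++ [kv.1])) PySem.Dict.empty)
      = ((cards.items.map Prod.swap).foldl (fun r q => r.modify q.1 [] (fun l => l ++ [q.2])) PySem.Dict.empty) by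
    rw [List.foldl_map]
    rfl]
  rw [PySem.Dict.getD_foldl_modify_append]
  simp [List.filter_map, Function.comp_def, Prod.swap]

theorem rev_keys (cards : PySem.Dict String Int) :
    (reverse_hand_rank cards).keys = PySem.Set.ofList (cards.items.map Prod.snd) := by
  rw [rev_eq_modify]
  rw [PySem.Dict.keys_foldl_modify_key cards.items (fun kv => kv.2) [] (fun _ kv l => l ++ [kv.1])]
  simp [PySem.Set.update_nil_left]

-- the fold inside PySem.List.max2?, named so that its steps can be rewritten
def m2step {α : Type} (k1 k2 : α → Int) : Option α → α → Option α :=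
  fun acc x =>
    match acc with
    | none => some x
    | some mm =>
      if (decide (k1 mm < k1 x) || !decide (k1 x < k1 mm) && decide (k2 mm < k2 x)) = true
      then some x else some mm

theorem max2?_eq_foldl {α : Type} (xs : List α) (k1 k2 : α → Int) :
    PySem.List.max2? xs k1 k2 = xs.foldl (m2step k1 k2) none := rfl

theorem m2step_some {α : Type} (k1 k2 : α → Int) (a x : α) :
    m2step k1 k2 (some a) x
      = if (decide (k1 a < k1 x) || !decide (k1 x < k1 a) && decide (k2 a < k2 x)) = true
        then some x else some a := rfl

theorem max2?_go {α : Type} (k1 k2 : α → Int) :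
    ∀ (xs : List α) (a : α), ∃ m,
      xs.foldl (m2step k1 k2) (some a) = some m
      ∧ (m = a ∨ m ∈ xs)
      ∧ (k1 a < k1 m ∨ (k1 a = k1 m ∧ k2 a ≤ k2 m))
      ∧ ∀ y ∈ xs, k1 y < k1 m ∨ (k1 y = k1 m ∧ k2 y ≤ k2 m) := by
  intro xs
  induction xs with
  | nil => intro a; exact ⟨a, rfl, Or.inl rfl, Or.inr ⟨rfl, le_refl _⟩, by simp⟩
  | cons x t ih =>
    intro a
    rw [List.foldl_cons, m2step_some]
    by_cases hc : (decide (k1 a < k1 x) || !decide (k1 x < k1 a) && decide (k2 a < k2 x)) = true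
    · rw [if_pos hc]
      simp only [Bool.or_eq_true, Bool.and_eq_true, decide_eq_true_eq, Bool.not_eq_true',
        decide_eq_false_iff_not, not_lt] at hc
      obtain ⟨m, hfold, hmem, hlex, hall⟩ := ih x
      refine ⟨m, hfold, ?_, by omega, ?_⟩
      · rcases hmem with h | h
        · exact Or.inr (by simp [h])
        · exact Or.inr (by simp [h])
      · intro y hy
        rcases List.mem_cons.mp hy with h | hy
        · subst h; exact hlex
        · exact hall y hy
    · rw [if_neg hc]
      simp only [Bool.or_eq_true, Bool.and_eq_true, decide_eq_true_eq, Bool.not_eq_true',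
        decide_eq_false_iff_not, not_lt, not_or, not_and] at hc
      obtain ⟨m, hfold, hmem, hlex, hall⟩ := ih a
      refine ⟨m, hfold, ?_, hlex, ?_⟩
      · rcases hmem with h | h
        · exact Or.inl h
        · exact Or.inr (by simp [h])
      · intro y hy
        rcases List.mem_cons.mp hy with h | hy
        · subst h; omega
        · exact hall y hy

theorem max2?_spec {α : Type} (xs : List α) (k1 k2 : α → Int) (m : α)
    (h : PySem.List.max2? xs k1 k2 = some m) :
    m ∈ xs ∧ ∀ y ∈ xs, k1 y < k1 m ∨ (k1 y = k1 m ∧ k2 y ≤ k2 m) := by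
  cases xs with
  | nil => simp [PySem.List.max2?] at h
  | cons x t =>
    rw [max2?_eq_foldl, List.foldl_cons] at h
    obtain ⟨m', hfold, hmem, hlex, hall⟩ := max2?_go k1 k2 t x
    rw [show m2step k1 k2 none x = some x from rfl, hfold] at h
    cases h
    refine ⟨?_, ?_⟩
    · rcases hmem with h | h
      · simp [h]
      · simp [h]
    · intro y hy
      rcases List.mem_cons.mp hy with h | hy
      · subst h; exact hlex
      · exact hall y hy

theorem max2?_isSome {α : Type} (xs : List α) (k1 k2 : α → Int) (h : xs ≠ []) :
    (PySem.List.max2? xs k1 k2).isSome := by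
  cases xs with
  | nil => simp at h
  | cons x t =>
    rw [max2?_eq_foldl, List.foldl_cons]
    obtain ⟨m', hfold, _, _, _⟩ := max2?_go k1 k2 t x
    rw [show m2step k1 k2 none x = some x from rfl, hfold]
    rfl

-- uniqueness of the (count, points)-argmax over the keys, under Pre_'s tie condition
theorem argmax_unique (c : PySem.Dict String Int)
    (htie : ∀ k1 ∈ c.keys, ∀ k2 ∈ c.keys, k1 ≠ k2 → (k1 ∉ pvLabels ∨ k2 ∉ pvLabels) →
      (∀ y ∈ c.keys, c.getD y 0 ≤ c.getD k1 0) → (∀ y ∈ c.keys, c.getD y 0 ≤ c.getD k2 0) → False)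
    (a b : String)
    (ha : a ∈ c.keys) (hb : b ∈ c.keys)
    (hamax : ∀ y ∈ c.keys, c.getD y 0 < c.getD a 0
      ∨ (c.getD y 0 = c.getD a 0 ∧ POINTS.getD y 0 ≤ POINTS.getD a 0))
    (hbmax : ∀ y ∈ c.keys, c.getD y 0 < c.getD b 0
      ∨ (c.getD y 0 = c.getD b 0 ∧ POINTS.getD y 0 ≤ POINTS.getD b 0)) : a = b := by
  by_contra hne
  have hav : ∀ y ∈ c.keys, c.getD y 0 ≤ c.getD a 0 := by
    intro y hy; rcases hamax y hy with h | h <;> omega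
  have hbv : ∀ y ∈ c.keys, c.getD y 0 ≤ c.getD b 0 := by
    intro y hy; rcases hbmax y hy with h | h <;> omega
  by_cases hla : a ∈ pvLabels
  · by_cases hlb : b ∈ pvLabels
    · have h1 := hamax b hb
      have h2 := hbmax a ha
      have hp : POINTS.getD a 0 = POINTS.getD b 0 := by omega
      exact hne (pts_inj a hla b hlb hp)
    · exact htie a ha b hb hne (Or.inr hlb) hav hbv
  · exact htie a ha b hb hne (Or.inl hla) hav hbv

-- A's selected card is a (count, points)-argmax over the keys
theorem awin_max (c : PySem.Dict String Int)
    (hnod : c.keys.Nodup) (hne : c.keys ≠ [])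
    (htie : ∀ k1 ∈ c.keys, ∀ k2 ∈ c.keys, k1 ≠ k2 → (k1 ∉ pvLabels ∨ k2 ∉ pvLabels) →
      (∀ y ∈ c.keys, c.getD y 0 ≤ c.getD k1 0) → (∀ y ∈ c.keys, c.getD y 0 ≤ c.getD k2 0) → False)
    (m : Int) (hm : PySem.List.max? (reverse_hand_rank c).keys (fun x => x) = some m) :
    ∃ w, w ∈ c.keys
      ∧ (∀ y ∈ c.keys, c.getD y 0 < c.getD w 0
          ∨ (c.getD y 0 = c.getD w 0 ∧ POINTS.getD y 0 ≤ POINTS.getD w 0))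
      ∧ ((reverse_hand_rank c).getD m []).length ≠ 0
      ∧ (((reverse_hand_rank c).getD m []).length = 1 →
          ((reverse_hand_rank c).getD m []).getD 0 "" = w)
      ∧ (((reverse_hand_rank c).getD m []).length > 1 →
          ∃ mx, PySem.List.max? (((reverse_hand_rank c).getD m []).foldl
              (fun d item => d.insert (POINTS.getD item 0) item)
              (PySem.Dict.empty : PySem.Dict Int String)).keys (fun x => x) = some mx
            ∧ (((reverse_hand_rank c).getD m []).foldl
              (fun d item => d.insert (POINTS.getD item 0) item)
              (PySem.Dict.empty : PySem.Dict Int String)).getD mx "" = w) := by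
  have hkeysdef : c.keys = c.items.map Prod.fst := rfl
  have hitems_ne : c.items ≠ [] := by
    intro h; apply hne; rw [hkeysdef, h]; rfl
  have rk := rev_keys c
  have hmem := PySem.List.max?_mem hm
  have hisM := PySem.List.max?_isMax hm
  rw [rk] at hmem hisM
  have hmval : m ∈ c.items.map Prod.snd := (PySem.Set.mem_ofList _ _).mp hmem
  have hvle : ∀ v ∈ c.items.map Prod.snd, v ≤ m := by
    intro v hv
    exact hisM v ((PySem.Set.mem_ofList _ _).mpr hv)
  have hS := rev_getD c m
  -- membership description of S
  have hSdesc : ∀ k, k ∈ (reverse_hand_rank c).getD m [] ↔ (k, m) ∈ c.items := by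
    intro k
    rw [hS]
    constructor
    · intro hk
      obtain ⟨kv, hkv, hfst⟩ := List.mem_map.mp hk
      have := List.of_mem_filter hkv
      have h2 : kv.2 = m := by simpa using this
      have : kv = (k, m) := by
        cases kv; simp at hfst h2 ⊢; exact ⟨hfst, h2⟩
      rw [← this]; exact List.mem_of_mem_filter hkv
    · intro hk
      exact List.mem_map.mpr ⟨(k, m), List.mem_filter.mpr ⟨hk, by simp⟩, rfl⟩
  have hSne : (reverse_hand_rank c).getD m [] ≠ [] := by
    obtain ⟨kv, hkv, hsnd⟩ := List.mem_map.mp hmval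
    intro h
    have : kv.1 ∈ (reverse_hand_rank c).getD m [] := by
      rw [hSdesc]; rw [← hsnd]; exact hkv
    rw [h] at this; exact (List.not_mem_nil) this
  have hSkeys : ∀ k ∈ (reverse_hand_rank c).getD m [], k ∈ c.keys := by
    intro k hk
    rw [hkeysdef]
    exact List.mem_map.mpr ⟨(k, m), (hSdesc k).mp hk, rfl⟩
  have hvS : ∀ k ∈ (reverse_hand_rank c).getD m [], c.getD k 0 = m := by
    intro k hk
    exact PySem.Dict.getD_of_mem_items c ((hSdesc k).mp hk) hnod 0
  have hSnodup : ((reverse_hand_rank c).getD m []).Nodup := by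
    rw [hS]
    have hsub : ((c.items.filter (fun kv => kv.2 == m)).map Prod.fst).Sublist (c.items.map Prod.fst) :=
      (List.filter_sublist).map Prod.fst
    exact (hkeysdef ▸ hnod).sublist hsub
  -- a candidate in S with maximal points is a global argmax
  have hcand : ∀ w ∈ (reverse_hand_rank c).getD m [],
      (∀ y ∈ (reverse_hand_rank c).getD m [], POINTS.getD y 0 ≤ POINTS.getD w 0) →
      ∀ y ∈ c.keys, c.getD y 0 < c.getD w 0
        ∨ (c.getD y 0 = c.getD w 0 ∧ POINTS.getD y 0 ≤ POINTS.getD w 0) := by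
    intro w hw hpmax y hy
    obtain ⟨kv, hkv, hfst⟩ := List.mem_map.mp (hkeysdef ▸ hy)
    have hgy : c.getD y 0 = kv.2 := by
      rw [← hfst]
      exact PySem.Dict.getD_of_mem_items c (by cases kv; exact hkv) hnod 0
    have hylem : kv.2 ≤ m := hvle kv.2 (List.mem_map.mpr ⟨kv, hkv, rfl⟩)
    have hgw : c.getD w 0 = m := hvS w hw
    rcases lt_or_eq_of_le hylem with h | h
    · exact Or.inl (by omega)
    · right
      constructor
      · omega
      · apply hpmax
        rw [hSdesc]
        have : kv = (y, m) := by cases kv; simp at hfst h ⊢; exact ⟨hfst, h⟩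
        rw [← this]; exact hkv
  rcases hlen : ((reverse_hand_rank c).getD m []).length with _ | n
  · exact absurd (List.length_eq_zero_iff.mp hlen) hSne
  rcases n with _ | n
  · -- count_max = 1
    obtain ⟨k0, hk0⟩ := List.length_eq_one_iff.mp hlen
    refine ⟨k0, hSkeys k0 (by rw [hk0]; simp), ?_, by omega, ?_, by omega⟩
    · apply hcand k0 (by rw [hk0]; simp)
      intro y hy
      rw [hk0] at hy
      simp at hy
      subst hy
      exact le_refl _
    · intro _
      rw [hk0]; rfl
  · -- count_max ≥ 2: by Pre_'s tie condition every tied key is a card label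
    have hSarg : ∀ s ∈ (reverse_hand_rank c).getD m [], ∀ y ∈ c.keys, c.getD y 0 ≤ c.getD s 0 := by
      intro s hs y hy
      obtain ⟨kv, hkv, hfst⟩ := List.mem_map.mp (hkeysdef ▸ hy)
      have hgy : c.getD y 0 = kv.2 := by
        rw [← hfst]
        exact PySem.Dict.getD_of_mem_items c (by cases kv; exact hkv) hnod 0
      have := hvle kv.2 (List.mem_map.mpr ⟨kv, hkv, rfl⟩)
      rw [hvS s hs]
      omega
    have hSlab : ∀ s ∈ (reverse_hand_rank c).getD m [], s ∈ pvLabels := by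
      intro s hs
      by_contra hns
      obtain ⟨s1, hs1, s2, hs2, hs12⟩ :
          ∃ s1 ∈ (reverse_hand_rank c).getD m [], ∃ s2 ∈ (reverse_hand_rank c).getD m [], s1 ≠ s2 := by
        rcases hcons : (reverse_hand_rank c).getD m [] with _ | ⟨a, _ | ⟨b, t⟩⟩
        · rw [hcons] at hlen; simp at hlen
        · rw [hcons] at hlen; simp at hlen
        · have hnd := hSnodup
          rw [hcons] at hnd
          exact ⟨a, by simp, b, by simp, by
            intro h; rw [h] at hnd; simp at hnd⟩
      have hs' : ∃ s' ∈ (reverse_hand_rank c).getD m [], s' ≠ s := by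
        by_cases h : s1 = s
        · exact ⟨s2, hs2, by rw [← h]; exact fun hh => hs12 hh.symm⟩
        · exact ⟨s1, hs1, h⟩
      obtain ⟨s', hsmem', hne'⟩ := hs'
      exact htie s (hSkeys s hs) s' (hSkeys s' hsmem') (fun h => hne' h.symm) (Or.inl hns)
        (hSarg s hs) (hSarg s' hsmem')
    have hfresh : ∀ a ∈ (reverse_hand_rank c).getD m [],
        (PySem.Dict.empty : PySem.Dict Int String).contains (POINTS.getD a 0) = false :=
      fun a _ => PySem.Dict.contains_empty _
    have hptsnodup : (((reverse_hand_rank c).getD m []).map (fun item => POINTS.getD item 0)).Nodup := by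
      apply List.Nodup.map_on _ hSnodup
      intro x hx y hy hxy
      exact pts_inj x (hSlab x hx) y (hSlab y hy) hxy
    have hmi : (((reverse_hand_rank c).getD m []).foldl
        (fun d item => d.insert (POINTS.getD item 0) item)
        (PySem.Dict.empty : PySem.Dict Int String)).items
        = ((reverse_hand_rank c).getD m []).map (fun item => (POINTS.getD item 0, item)) := by
      have := PySem.Dict.items_foldl_insert_fresh ((reverse_hand_rank c).getD m [])
        (fun item => POINTS.getD item 0) (fun item => item)
        (PySem.Dict.empty : PySem.Dict Int String) hfresh hptsnodup
      simpa using this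
    have hmk : (((reverse_hand_rank c).getD m []).foldl
        (fun d item => d.insert (POINTS.getD item 0) item)
        (PySem.Dict.empty : PySem.Dict Int String)).keys
        = ((reverse_hand_rank c).getD m []).map (fun item => POINTS.getD item 0) := by
      show (((reverse_hand_rank c).getD m []).foldl
        (fun d item => d.insert (POINTS.getD item 0) item)
        (PySem.Dict.empty : PySem.Dict Int String)).items.map Prod.fst = _
      rw [hmi, List.map_map]
      rfl
    have hmkne : (((reverse_hand_rank c).getD m []).foldl
        (fun d item => d.insert (POINTS.getD item 0) item)
        (PySem.Dict.empty : PySem.Dict Int String)).keys ≠ [] := by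
      rw [hmk]
      simpa using hSne
    cases hmx : PySem.List.max? (((reverse_hand_rank c).getD m []).foldl
        (fun d item => d.insert (POINTS.getD item 0) item)
        (PySem.Dict.empty : PySem.Dict Int String)).keys (fun x => x) with
    | none => exact absurd ((PySem.List.max?_eq_none_iff _ _).mp hmx) hmkne
    | some mx =>
      have hmxmem := PySem.List.max?_mem hmx
      have hmxmax := PySem.List.max?_isMax hmx
      rw [hmk] at hmxmem hmxmax
      obtain ⟨ks, hks, hpks⟩ := List.mem_map.mp hmxmem
      have hgetw : (((reverse_hand_rank c).getD m []).foldl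
          (fun d item => d.insert (POINTS.getD item 0) item)
          (PySem.Dict.empty : PySem.Dict Int String)).getD mx "" = ks := by
        apply PySem.Dict.getD_of_mem_items _ _ _
        · rw [hmi]
          exact List.mem_map.mpr ⟨ks, hks, by rw [hpks]⟩
        · show ((((reverse_hand_rank c).getD m []).foldl
            (fun d item => d.insert (POINTS.getD item 0) item)
            (PySem.Dict.empty : PySem.Dict Int String)).items.map Prod.fst).Nodup
          rw [hmi, List.map_map]
          exact hptsnodup
      refine ⟨ks, hSkeys ks hks, ?_, by omega, by omega, fun _ => ⟨mx, rfl, hgetw⟩⟩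
      apply hcand ks hks
      intro y hy
      have := hmxmax (POINTS.getD y 0) (List.mem_map.mpr ⟨y, hy, rfl⟩)
      simpa [hpks] using this

-- ===== VERDICT (by name: the statement is the Claim_ definition above) =====
theorem replace_jokers_spec : Claim_equal_replace_jokers := by
  intro cards _ hpre
  obtain ⟨hJ0, htie0⟩ := hpre
  unfold Spec_replace_jokers
  simp only [replace_jokers, replace_jokers_alt]
  have hnod0 := PySem.Dict.nodup_keys_ofList cards
  cases hg : PySem.Dict.get? (PySem.Dict.ofList cards) "J" with
  | none => exact absurd hJ0 ((PySem.Dict.get?_eq_none_iff_not_mem_keys _ _).mp hg)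
  | some j =>
    simp only [sub_self]
    set c := (PySem.Dict.ofList cards).insert "J" 0 with hc
    have hnod : c.keys.Nodup := PySem.Dict.nodup_keys_insert _ _ _ hnod0
    have hJc : "J" ∈ c.keys := (PySem.Dict.mem_keys_insert _ _ _ _).mpr (Or.inl rfl)
    have hne : c.keys ≠ [] := by
      intro h; rw [h] at hJc; exact List.not_mem_nil hJc
    have hrkne : (reverse_hand_rank c).keys ≠ [] := by
      rw [rev_keys]
      have hitems_ne : c.items ≠ [] := by
        intro h
        apply hne
        show c.items.map Prod.fst = []
        rw [h]; rfl
      intro h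
      cases hci : c.items with
      | nil => exact hitems_ne hci
      | cons kv t =>
        have : kv.2 ∈ PySem.Set.ofList (c.items.map Prod.snd) := by
          rw [PySem.Set.mem_ofList]
          exact List.mem_map.mpr ⟨kv, by rw [hci]; exact List.mem_cons_self, rfl⟩
        rw [h] at this
        exact List.not_mem_nil this
    cases hmm : PySem.List.max? (reverse_hand_rank c).keys (fun x => x) with
    | none => exact absurd ((PySem.List.max?_eq_none_iff _ _).mp hmm) hrkne
    | some m =>
      obtain ⟨w, hwkeys, hwmax, hlen0, hone, htwo⟩ := awin_max c hnod hne htie0 m hmm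
      cases hb : PySem.List.max2? c.keys (fun k => c.getD k 0) (fun k => POINTS.getD k 0) with
      | none =>
        have := max2?_isSome c.keys (fun k => c.getD k 0) (fun k => POINTS.getD k 0) hne
        rw [hb] at this
        exact absurd this (by simp)
      | some best =>
        obtain ⟨hbmem, hbmax⟩ := max2?_spec c.keys (fun k => c.getD k 0) (fun k => POINTS.getD k 0) best hb
        have hweq : w = best := argmax_unique c htie0 w best hwkeys hbmem hwmax hbmax
        dsimp only
        rcases hlS : ((reverse_hand_rank c).getD m []).length with _ | nn
        · exact absurd hlS hlen0
        rcases nn with _ | nn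
        · -- count_max = 1
          rw [if_pos (by norm_num)]
          rw [hone (by omega), hweq]
        · -- count_max ≥ 2
          obtain ⟨mx, hmx, hget⟩ := htwo (by omega)
          rw [if_neg (by omega), if_pos (by omega)]
          rw [hmx]
          dsimp only
          rw [hget, hweq]
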